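-- pv_equiv track=rewrite | github.com/haniano/moje-programowanie | pythonProject/main.py | newTuple
-- ===== SOURCE A (Python) =====
-- def newTuple(tuple, index):
--     newtuple = []
--     for i in range(0, len(tuple)):
--         if i == index and tuple[i] > 0:
--             newtuple.append(tuple[i] - 1)
--         else:
--             newtuple.append(tuple[i])
--     return newtuple
-- ===== SOURCE B (Python) =====
-- def newTuple(tuple, index):
--     newtuple = list(tuple)
--     if 0 <= index < len(tuple) and tuple[index] > 0:
--         newtuple[index] -= 1
--     return newtuple
-- ===== Notes on version B (the rewrite author's own statement) =====
-- stated objective: simpler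
-- what changed: B copies the whole list at once (list(tuple)) and applies a single guarded decrement at the index, instead of A's per-element loop that compares every position against the index.
import Mathlib
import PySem

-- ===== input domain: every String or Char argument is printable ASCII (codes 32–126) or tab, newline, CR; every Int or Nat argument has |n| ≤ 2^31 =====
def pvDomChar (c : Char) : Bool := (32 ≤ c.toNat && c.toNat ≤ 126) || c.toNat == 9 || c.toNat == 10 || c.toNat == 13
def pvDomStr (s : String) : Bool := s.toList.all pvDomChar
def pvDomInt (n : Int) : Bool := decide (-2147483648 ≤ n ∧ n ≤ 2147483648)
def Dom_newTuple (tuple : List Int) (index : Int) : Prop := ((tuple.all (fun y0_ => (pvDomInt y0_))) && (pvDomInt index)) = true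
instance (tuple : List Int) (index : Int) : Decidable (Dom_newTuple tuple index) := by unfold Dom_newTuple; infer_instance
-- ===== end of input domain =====

-- ===== PORT A =====
-- B changes only the decomposition: bulk copy plus one guarded decrement, instead of a per-element branch; objective: simpler.
def newTuple (tuple : List Int) (index : Int) : List Int :=
  (PySem.List.pyRange 0 tuple.length 1).foldl (fun acc i =>
    if i = index ∧ PySem.List.pyGetD tuple i 0 > 0 then
      acc ++ [PySem.List.pyGetD tuple i 0 - 1]
    else
      acc ++ [PySem.List.pyGetD tuple i 0]) []

-- ===== PORT B =====
def newTuple_alt (tuple : List Int) (index : Int) : List Int :=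
  if 0 ≤ index ∧ index < tuple.length ∧ PySem.List.pyGetD tuple index 0 > 0 then
    tuple.set index.toNat (PySem.List.pyGetD tuple index 0 - 1)
  else
    tuple

-- ===== PRECONDITION & SPEC =====
def Spec_newTuple (tuple : List Int) (index : Int) (out : List Int) : Prop := out = newTuple_alt tuple index
instance (tuple : List Int) (index : Int) (out : List Int) : Decidable (Spec_newTuple tuple index out) := by unfold Spec_newTuple; infer_instance

-- ===== CLAIM (what is proved, stated in full; the proofs are below) =====
def Claim_equal_newTuple : Prop := ∀ (tuple : List Int) (index : Int), Dom_newTuple tuple index → Spec_newTuple tuple index (newTuple tuple index)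

-- ===== LEMMAS AND PROOFS =====
theorem newTuple_eq_map (tuple : List Int) (index : Int) :
    newTuple tuple index = (PySem.List.pyRange 0 tuple.length 1).map (fun i =>
      if i = index ∧ PySem.List.pyGetD tuple i 0 > 0 then PySem.List.pyGetD tuple i 0 - 1
      else PySem.List.pyGetD tuple i 0) := by
  unfold newTuple
  have hfun : (fun (acc : List Int) (i : Int) =>
      if i = index ∧ PySem.List.pyGetD tuple i 0 > 0 then acc ++ [PySem.List.pyGetD tuple i 0 - 1]
      else acc ++ [PySem.List.pyGetD tuple i 0]) = (fun acc i => acc ++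
        [if i = index ∧ PySem.List.pyGetD tuple i 0 > 0 then PySem.List.pyGetD tuple i 0 - 1
         else PySem.List.pyGetD tuple i 0]) := by
    funext acc i; split_ifs <;> rfl
  rw [hfun, PySem.List.foldl_append_singleton_eq_map]
  simp

-- ===== VERDICT (by name: the statement is the Claim_ definition above) =====
theorem newTuple_spec : Claim_equal_newTuple := by
  intro tuple index _
  unfold Spec_newTuple newTuple_alt
  rw [newTuple_eq_map]
  by_cases hcase : 0 ≤ index ∧ index < (tuple.length : Int) ∧ PySem.List.pyGetD tuple index 0 > 0
  · rw [if_pos hcase]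
    apply List.ext_getElem (by simp [PySem.List.length_pyRange_one])
    intro k h1 h2
    have hk : k < tuple.length := by simpa using h2
    rw [List.getElem_map, PySem.List.getElem_pyRange_one, List.getElem_set]
    have hget : PySem.List.pyGetD tuple ((k : Int)) 0 = tuple[k] := by
      simp [PySem.List.pyGetD_natCast, List.getD_eq_getElem?_getD, hk]
    simp only [zero_add]
    by_cases hk2 : (k : Int) = index
    · have hidx : index.toNat = k := by omega
      rw [if_pos ⟨hk2, by rw [hk2]; exact hcase.2.2⟩, if_pos hidx, ← hk2, hget]
    · rw [if_neg (fun h => hk2 h.1), if_neg (by omega), hget]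
  · rw [if_neg hcase]
    apply List.ext_getElem (by simp [PySem.List.length_pyRange_one])
    intro k h1 h2
    have hk : k < tuple.length := by simpa using h2
    rw [List.getElem_map, PySem.List.getElem_pyRange_one]
    have hget : PySem.List.pyGetD tuple ((k : Int)) 0 = tuple[k] := by
      simp [PySem.List.pyGetD_natCast, List.getD_eq_getElem?_getD, hk]
    simp only [zero_add]
    rw [if_neg, hget]
    rintro ⟨hk2, hpos⟩
    exact hcase ⟨by omega, by omega, hk2 ▸ hpos⟩
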